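-- pv_equiv track=rewrite | github.com/quatch1247/blog-content-automation | app/services/summarize_service.py | _clean_table_newlines
-- ===== SOURCE A (Python) =====
-- def _clean_table_newlines(md_text: str) -> str:
--     lines = md_text.splitlines()
--
--     def is_table_line(s: str) -> bool:
--         s = s.rstrip()
--         return s.startswith("|") and s.endswith("|") and ("|" in s[1:-1])
--
--     cleaned = []
--     i = 0
--     while i < len(lines):
--         raw = lines[i]
--         s = raw.lstrip()
--         if is_table_line(s):
--             if cleaned and cleaned[-1].strip() != "":
--                 cleaned.append("")
--
--             table_block = []
--             while i < len(lines):
--                 cur = lines[i].lstrip()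
--                 if is_table_line(cur):
--                     table_block.append(cur.rstrip())
--                     i += 1
--                 else:
--                     break
--
--             cleaned.extend(table_block)
--
--             cleaned.append("")
--             continue
--
--         else:
--             cleaned.append(raw)
--             i += 1
--
--     # 뒤쪽 여분 개행 정리
--     out = "\n".join(cleaned).strip() + "\n"
--     return out
-- ===== SOURCE B (Python) =====
-- def _clean_table_newlines(md_text: str) -> str:
--     lines = md_text.splitlines()
--
--     def is_table_line(s: str) -> bool:
--         s = s.rstrip()
--         return s.startswith("|") and s.endswith("|") and ("|" in s[1:-1])
--
--     t = [is_table_line(l.lstrip()) for l in lines]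
--
--     def emit(i: int, raw: str) -> list:
--         if not t[i]:
--             return [raw]
--         before = [""] if i > 0 and not t[i - 1] and lines[i - 1].strip() != "" else []
--         after = [""] if i + 1 == len(lines) or not t[i + 1] else []
--         return before + [raw.strip()] + after
--
--     pieces = [seg for i, raw in enumerate(lines) for seg in emit(i, raw)]
--     return "\n".join(pieces).strip() + "\n"
-- ===== Notes on version B (the rewrite author's own statement) =====
-- stated objective: alternative
-- what changed: Replaced A's stateful nested-while scan (which inspects the accumulator's last element and collects table runs in an inner loop) with a stateless formulation: a table-flag list is precomputed once and each line is mapped independently to its output contribution (optional blank-before, stripped line, optional blank-after) decided purely from its neighbours' flags, assembled by a single flat comprehension.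
import Mathlib
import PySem

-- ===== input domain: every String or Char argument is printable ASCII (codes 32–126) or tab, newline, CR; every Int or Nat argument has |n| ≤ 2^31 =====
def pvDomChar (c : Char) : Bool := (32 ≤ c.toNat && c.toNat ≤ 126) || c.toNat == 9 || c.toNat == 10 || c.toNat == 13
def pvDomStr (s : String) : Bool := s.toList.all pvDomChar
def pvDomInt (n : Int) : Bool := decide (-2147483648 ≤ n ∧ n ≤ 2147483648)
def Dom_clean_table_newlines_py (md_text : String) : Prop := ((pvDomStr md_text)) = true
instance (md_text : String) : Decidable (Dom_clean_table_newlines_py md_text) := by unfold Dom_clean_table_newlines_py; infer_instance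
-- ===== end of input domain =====

-- B replaces A's stateful nested-while scan by a stateless per-line rule: a table-flag
-- list is precomputed and each line's contribution is decided from its neighbours' flags
-- alone, assembled by one flat comprehension; objective: alternative, not faster.

-- ===== PORT A =====
-- helper is_table_line (identical in both Python sources)
def pvIsTable (s : String) : Bool :=
  let t := PySem.Str.rstrip s
  PySem.Str.startswith t "|" && PySem.Str.endswith t "|" &&
    PySem.Str.isIn "|" (PySem.Str.slice t (some 1) (some (-1)))

-- A's inner while: collect the maximal run of table lines (stripped) and the remainder
def pvTakeTable : List String → (List String × List String)
  | [] => ([], [])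
  | l :: rest =>
    let cur := PySem.Str.lstrip l
    if pvIsTable cur then
      let tb := pvTakeTable rest
      (PySem.Str.rstrip cur :: tb.1, tb.2)
    else ([], l :: rest)

theorem pvTakeTable_snd_length_le (l : List String) : (pvTakeTable l).2.length ≤ l.length := by
  induction l with
  | nil => simp [pvTakeTable]
  | cons x xs ih =>
    simp only [pvTakeTable]
    split
    · simpa using Nat.le_succ_of_le ih
    · simp

theorem pvTakeTable_cons_table (raw : String) (rest : List String)
    (h : pvIsTable (PySem.Str.lstrip raw) = true) :
    (pvTakeTable (raw :: rest)).2.length < (raw :: rest).length := by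
  have h2 : (pvTakeTable (raw :: rest)).2 = (pvTakeTable rest).2 := by
    simp [pvTakeTable, h]
  rw [h2, List.length_cons]
  exact Nat.lt_succ_of_le (pvTakeTable_snd_length_le rest)

-- A's outer while loop over the line index, with the `cleaned` accumulator
def pvALoop (lines : List String) (cleaned : List String) : List String :=
  match lines with
  | [] => cleaned
  | raw :: rest =>
    if _h : pvIsTable (PySem.Str.lstrip raw) then
      pvALoop (pvTakeTable (raw :: rest)).2
        ((if cleaned ≠ [] ∧ PySem.Str.strip (cleaned.getLast?.getD "") ≠ "" then
            cleaned ++ [""] else cleaned) ++ (pvTakeTable (raw :: rest)).1 ++ [""])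
    else pvALoop rest (cleaned ++ [raw])
termination_by lines.length
decreasing_by
  · exact pvTakeTable_cons_table raw rest _h
  · simp

def clean_table_newlines_py (md_text : String) : String :=
  PySem.Str.strip (PySem.Str.join "\n" (pvALoop (PySem.Str.splitlines md_text) [])) ++ "\n"

-- ===== PORT B =====
-- t = [is_table_line(l.lstrip()) for l in lines]
def pvFlags (lines : List String) : List Bool :=
  lines.map (fun l => pvIsTable (PySem.Str.lstrip l))

-- emit(i, raw): the contribution of line i, decided from the neighbour flags alone
def pvEmit (lines : List String) (t : List Bool) (p : Int × String) : List String :=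
  if ¬ (PySem.List.pyGetD t p.1 false = true) then [p.2]
  else
    (if p.1 > 0 ∧ PySem.List.pyGetD t (p.1 - 1) false = false ∧
        PySem.Str.strip (PySem.List.pyGetD lines (p.1 - 1) "") ≠ "" then [""] else []) ++
    [PySem.Str.strip p.2] ++
    (if p.1 + 1 = (lines.length : Int) ∨ PySem.List.pyGetD t (p.1 + 1) false = false then [""] else [])

def clean_table_newlines_py_alt (md_text : String) : String :=
  PySem.Str.strip (PySem.Str.join "\n"
    ((PySem.List.enumerate (PySem.Str.splitlines md_text)).flatMap
      (pvEmit (PySem.Str.splitlines md_text) (pvFlags (PySem.Str.splitlines md_text))))) ++ "\n"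

-- ===== PRECONDITION & SPEC =====
def Spec_clean_table_newlines_py (md_text : String) (out : String) : Prop := out = clean_table_newlines_py_alt md_text
instance (md_text : String) (out : String) : Decidable (Spec_clean_table_newlines_py md_text out) := by unfold Spec_clean_table_newlines_py; infer_instance

-- ===== CLAIM (what is proved, stated in full; the proofs are below) =====
def Claim_equal_clean_table_newlines_py : Prop := ∀ (md_text : String), Dom_clean_table_newlines_py md_text → Spec_clean_table_newlines_py md_text (clean_table_newlines_py md_text)

-- ===== LEMMAS AND PROOFS =====

def pvKey (l : String) : Bool := pvIsTable (PySem.Str.lstrip l)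

theorem strip_eq_rstrip_lstrip (s : String) :
    PySem.Str.strip s = PySem.Str.rstrip (PySem.Str.lstrip s) := by
  simp [PySem.Str.strip, PySem.Str.rstrip, PySem.Str.lstrip, PySem.Chars.strip,
    PySem.Chars.rstrip, PySem.Chars.lstrip]

-- A's inner while is takeWhile/dropWhile on the table-line key
theorem pvTakeTable_eq (l : List String) :
    pvTakeTable l = ((l.takeWhile pvKey).map PySem.Str.strip, l.dropWhile pvKey) := by
  induction l with
  | nil => simp [pvTakeTable]
  | cons x xs ih =>
    simp only [pvTakeTable, List.takeWhile_cons, List.dropWhile_cons, pvKey]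
    by_cases h : pvIsTable (PySem.Str.lstrip x)
    · simp [h, ih, strip_eq_rstrip_lstrip]
    · simp [h]

-- flag lookup at an in-range index
theorem pvFlag_lookup (L : List String) (i : Nat) (h : i < L.length) :
    PySem.List.pyGetD (L.map pvKey) (i : Int) false = pvKey L[i] := by
  rw [PySem.List.pyGetD_natCast]
  simp [List.getD, h]

theorem pvLine_lookup (L : List String) (i : Nat) (h : i < L.length) :
    PySem.List.pyGetD L (i : Int) "" = L[i] := by
  rw [PySem.List.pyGetD_natCast]
  simp [List.getD, h]

-- the invariant A's accumulator satisfies at the start of each outer iteration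
def pvInv (L : List String) (i : Nat) (out : List String) : Prop :=
  (i = 0 ∧ out = []) ∨
  (0 < i ∧ i ≤ L.length ∧ pvKey L[i-1]! = false ∧ out.getLast? = some L[i-1]!) ∨
  (0 < i ∧ i ≤ L.length ∧ pvKey L[i-1]! = true ∧ out.getLast? = some "")


theorem pvStrip_empty : PySem.Str.strip "" = "" := by decide

-- condition alignment: B's blank-before test at Int index i-1 vs the Nat-index form
theorem pvBefore_eq (L : List String) (i : Nat) (hi : i ≤ L.length) :
    (if ((i:Int)) > 0 ∧ PySem.List.pyGetD (L.map pvKey) ((i:Int) - 1) false = false ∧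
        PySem.Str.strip (PySem.List.pyGetD L ((i:Int) - 1) "") ≠ "" then ([""]:List String) else [])
    = (if 0 < i ∧ pvKey L[i-1]! = false ∧ PySem.Str.strip L[i-1]! ≠ "" then [""] else []) := by
  cases i with
  | zero => simp
  | succ k =>
    have hk : k < L.length := by omega
    have h1 : ((k+1 : Nat) : Int) - 1 = ((k : Nat) : Int) := by push_cast; ring
    rw [h1, pvFlag_lookup L k hk, pvLine_lookup L k hk]
    have h2 : L[k+1-1]! = L[k] := by
      simp [hk]
    rw [h2]
    simp

set_option maxHeartbeats 600000 in
theorem pvRun_lemma (L : List String) :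
    ∀ (s : List String) (i : Nat), s = L.drop i → ∀ a rest, s = a :: rest → pvKey a = true →
    (PySem.List.enumerate (s.takeWhile pvKey) i).flatMap (pvEmit L (L.map pvKey)) =
      (if 0 < i ∧ pvKey L[i-1]! = false ∧ PySem.Str.strip L[i-1]! ≠ "" then [""] else [])
      ++ (s.takeWhile pvKey).map PySem.Str.strip ++ [""] := by
  intro s
  induction s with
  | nil => intro i _ a rest hc; exact absurd hc (by simp)
  | cons x xs ih =>
    intro i hdrop a rest hc hkey
    obtain ⟨rfl, rfl⟩ := List.cons_eq_cons.mp hc.symm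
    have hiL : i < L.length := by
      by_contra hnot
      rw [List.drop_eq_nil_of_le (by omega)] at hdrop
      exact absurd hdrop.symm (by simp)
    have hcons : L.drop i = L[i] :: L.drop (i+1) := List.drop_eq_getElem_cons hiL
    rw [← hdrop] at hcons
    obtain ⟨hx, hxs⟩ := List.cons_eq_cons.mp hcons
    have htw : (a :: rest).takeWhile pvKey = a :: rest.takeWhile pvKey := by
      rw [List.takeWhile_cons, if_pos hkey]
    have hflag : PySem.List.pyGetD (L.map pvKey) ((i:Int)) false = true := by
      rw [pvFlag_lookup L i hiL, ← hx, hkey]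
    rw [htw, PySem.List.enumerate_cons, List.flatMap_cons]
    have hEmit : pvEmit L (L.map pvKey) ((i:Int), a) =
        (if ((i:Int)) > 0 ∧ PySem.List.pyGetD (L.map pvKey) ((i:Int) - 1) false = false ∧
            PySem.Str.strip (PySem.List.pyGetD L ((i:Int) - 1) "") ≠ "" then [""] else []) ++
        [PySem.Str.strip a] ++
        (if (i:Int) + 1 = (L.length : Int) ∨ PySem.List.pyGetD (L.map pvKey) ((i:Int) + 1) false = false
          then [""] else []) := by
      rw [pvEmit, if_neg (by simp [hflag])]
    rw [hEmit, pvBefore_eq L i (Nat.le_of_lt hiL)]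
    cases hxse : rest with
    | nil =>
      subst hxse
      have hend : i + 1 = L.length := by
        have h0 : L.drop (i+1) = [] := hxs.symm
        have := List.drop_eq_nil_iff.mp h0
        omega
      have hafter : ((i:Int) + 1 = (L.length : Int) ∨
          PySem.List.pyGetD (L.map pvKey) ((i:Int) + 1) false = false) := by
        left; rw [← hend]; push_cast; ring
      rw [if_pos hafter]
      simp
    | cons y ys =>
      subst hxse
      have hyL : i + 1 < L.length := by
        by_contra hnot
        have h0 : L.drop (i+1) = [] := List.drop_eq_nil_of_le (by omega)
        rw [← hxs] at h0
        exact absurd h0 (by simp)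
      have hy : L[i+1] = y := by
        have h1 : L.drop (i+1) = L[i+1] :: L.drop (i+2) := List.drop_eq_getElem_cons hyL
        rw [← hxs] at h1
        exact (List.cons_eq_cons.mp h1).1.symm
      have hcast : ((i:Int) + 1) = (((i+1 : Nat)):Int) := by push_cast; ring
      have hflag1 : PySem.List.pyGetD (L.map pvKey) ((i:Int) + 1) false = pvKey y := by
        rw [hcast, pvFlag_lookup L (i+1) hyL, hy]
      by_cases hky : pvKey y = true
      · -- the table run continues on the next line
        have hafter : ¬ ((i:Int) + 1 = (L.length : Int) ∨
            PySem.List.pyGetD (L.map pvKey) ((i:Int) + 1) false = false) := by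
          intro hor
          rcases hor with heq | hfl
          · have : i + 1 = L.length := by exact_mod_cast heq
            omega
          · rw [hflag1, hky] at hfl
            simp at hfl
        rw [if_neg hafter]
        have hrec := ih (i+1) hxs y ys rfl hky
        have hb : (if 0 < i+1 ∧ pvKey L[i+1-1]! = false ∧ PySem.Str.strip L[i+1-1]! ≠ ""
            then ([""]:List String) else []) = [] := by
          rw [if_neg]
          intro hcon
          have hL : L[i+1-1]! = L[i] := by
            have : i+1-1 = i := by omega
            rw [this, List.getElem!_eq_getElem?_getD]
            simp [hiL]
          rw [hL, ← hx] at hcon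
          exact absurd hcon.2.1 (by simp [hkey])
        rw [hcast, hrec, hb]
        simp
      · -- the run ends before the next line
        have hafter : ((i:Int) + 1 = (L.length : Int) ∨
            PySem.List.pyGetD (L.map pvKey) ((i:Int) + 1) false = false) := by
          right; rw [hflag1]; simpa using hky
        rw [if_pos hafter]
        have htw0 : (y :: ys).takeWhile pvKey = [] := by
          rw [List.takeWhile_cons, if_neg hky]
        simp [htw0]

theorem pvGetBang (L : List String) (j : Nat) (h : j < L.length) : L[j]! = L[j] := by
  rw [List.getElem!_eq_getElem?_getD]
  simp [h]

-- A's blank-before-block append equals B's condition, given the accumulator invariant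
theorem pvBlank_match (L : List String) (i : Nat) (out : List String) (hInv : pvInv L i out) :
    (if out ≠ [] ∧ PySem.Str.strip (out.getLast?.getD "") ≠ "" then out ++ [""] else out)
    = out ++ (if 0 < i ∧ pvKey L[i-1]! = false ∧ PySem.Str.strip L[i-1]! ≠ "" then [""] else []) := by
  rcases hInv with ⟨hi, hout⟩ | ⟨hi, _, hkf, hlast⟩ | ⟨hi, _, hkt, hlast⟩
  · subst hout; simp [hi]
  · have hne : out ≠ [] := by intro h; rw [h] at hlast; simp at hlast
    have hgd : out.getLast?.getD "" = L[i-1]! := by rw [hlast]; rfl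
    by_cases hp : PySem.Str.strip L[i-1]! ≠ ""
    · rw [if_pos ⟨hne, by rw [hgd]; exact hp⟩, if_pos ⟨hi, hkf, hp⟩]
    · rw [if_neg (by rw [hgd]; intro hcon; exact hp hcon.2),
        if_neg (by intro hcon; exact hp hcon.2.2)]
      simp
  · have hgd : PySem.Str.strip (out.getLast?.getD "") = "" := by rw [hlast]; exact pvStrip_empty
    rw [if_neg (by intro hcon; exact hcon.2 hgd),
      if_neg (by intro hcon; rw [hkt] at hcon; exact absurd hcon.2.1 (by simp))]
    simp

set_option maxHeartbeats 600000 in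
theorem pvMain (L : List String) :
    ∀ (n i : Nat) (out : List String), L.length - i ≤ n → pvInv L i out →
    pvALoop (L.drop i) out =
      out ++ (PySem.List.enumerate (L.drop i) i).flatMap (pvEmit L (L.map pvKey)) := by
  intro n
  induction n with
  | zero =>
    intro i out hn _
    have h0 : L.drop i = [] := List.drop_eq_nil_of_le (by omega)
    rw [h0]
    simp [pvALoop]
  | succ n ih =>
    intro i out hn hInv
    by_cases hiL : i < L.length
    · have hcons : L.drop i = L[i] :: L.drop (i+1) := List.drop_eq_getElem_cons hiL
      by_cases hk : pvKey L[i] = true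
      · -- table block starting at line i
        have hk' : pvIsTable (PySem.Str.lstrip L[i]) = true := hk
        have htwc : (L.drop i).takeWhile pvKey = L[i] :: (L.drop (i+1)).takeWhile pvKey := by
          rw [hcons, List.takeWhile_cons, if_pos hk]
        have hm1 : 1 ≤ ((L.drop i).takeWhile pvKey).length := by rw [htwc]; simp
        have hmsl : ((L.drop i).takeWhile pvKey).length ≤ L.length - i := by
          have h1 := (List.takeWhile_prefix (p := pvKey) (l := L.drop i)).length_le
          simpa using h1
        set m := ((L.drop i).takeWhile pvKey).length with hm
        have hdw : (L.drop i).dropWhile pvKey = L.drop (i + m) := by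
          have h1 : (L.drop i).dropWhile pvKey =
              (((L.drop i).takeWhile pvKey) ++ (L.drop i).dropWhile pvKey).drop m := by
            rw [hm, List.drop_left]
          rw [List.takeWhile_append_dropWhile] at h1
          rw [h1, List.drop_drop, Nat.add_comm]
        have hmlen : i + m ≤ L.length := by omega
        have hlastkey : pvKey L[i+m-1]! = true := by
          have hm0 : m - 1 < m := by omega
          have hlt : m - 1 < (L.drop i).length := by rw [List.length_drop]; omega
          have hpref : (L.drop i).takeWhile pvKey <+: L.drop i := List.takeWhile_prefix _
          have hkeyel : pvKey (((L.drop i).takeWhile pvKey)[m-1]'hm0) = true :=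
            List.mem_takeWhile_imp (List.getElem_mem hm0)
          have hel : ((L.drop i).takeWhile pvKey)[m-1]'hm0 = (L.drop i)[m-1]'hlt :=
            hpref.getElem hm0
          have h3 : i + m - 1 = i + (m-1) := by omega
          rw [h3, pvGetBang L (i+(m-1)) (by omega)]
          rw [show L[i + (m-1)]'(by omega) = (L.drop i)[m-1]'hlt from by
            simp [List.getElem_drop]]
          rw [← hel]
          exact hkeyel
        -- take one step of A's loop
        rw [hcons, pvALoop]
        rw [dif_pos hk']
        rw [← hcons]
        rw [pvTakeTable_eq, hdw]
        have hInv' : pvInv L (i+m)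
            ((if out ≠ [] ∧ PySem.Str.strip (out.getLast?.getD "") ≠ "" then out ++ [""] else out)
              ++ ((L.drop i).takeWhile pvKey).map PySem.Str.strip ++ [""]) :=
          Or.inr (Or.inr ⟨by omega, hmlen, hlastkey, by simp⟩)
        rw [ih (i+m) _ (by omega) hInv']
        -- split B's enumeration at the end of the run
        have hsplit : L.drop i = ((L.drop i).takeWhile pvKey) ++ (L.drop i).dropWhile pvKey :=
          (List.takeWhile_append_dropWhile ..).symm
        conv_rhs => rw [hsplit]
        rw [PySem.List.enumerate_append, List.flatMap_append, hdw,
          pvRun_lemma L (L.drop i) i rfl L[i] (L.drop (i+1)) hcons hk,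
          pvBlank_match L i out hInv]
        have hc2 : ((i : Int) + ((L.drop i).takeWhile pvKey).length) = (((i + m : Nat)) : Int) := by
          rw [← hm]; push_cast; ring
        rw [hc2]
        simp [List.append_assoc]
      · -- ordinary line
        have hk' : ¬ pvIsTable (PySem.Str.lstrip L[i]) = true := hk
        rw [hcons, pvALoop, dif_neg hk']
        have hInv' : pvInv L (i+1) (out ++ [L[i]]) :=
          Or.inr (Or.inl ⟨by omega, by omega, by
            have h5 : L[i+1-1]! = L[i] := by
              rw [show i+1-1 = i from by omega]
              exact pvGetBang L i hiL
            rw [h5]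
            simpa using hk, by simp [hiL]⟩)
        rw [ih (i+1) _ (by omega) hInv']
        rw [PySem.List.enumerate_cons, List.flatMap_cons]
        have hF : pvEmit L (L.map pvKey) ((i:Int), L[i]) = [L[i]] := by
          rw [pvEmit, if_pos (by rw [pvFlag_lookup L i hiL]; simpa using hk)]
        have hc1 : ((i : Int) + 1) = (((i + 1 : Nat)) : Int) := by push_cast; ring
        rw [hF, hc1]
        simp [List.append_assoc]
    · have h0 : L.drop i = [] := List.drop_eq_nil_of_le (by omega)
      rw [h0]
      simp [pvALoop]

-- ===== VERDICT (by name: the statement is the Claim_ definition above) =====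
theorem clean_table_newlines_py_spec : Claim_equal_clean_table_newlines_py := by
  intro md_text _
  unfold Spec_clean_table_newlines_py clean_table_newlines_py clean_table_newlines_py_alt pvFlags
  have h := pvMain (PySem.Str.splitlines md_text) (PySem.Str.splitlines md_text).length 0 []
    (by omega) (Or.inl ⟨rfl, rfl⟩)
  simp only [List.drop_zero, Nat.cast_zero, List.nil_append] at h
  rw [h]
  rfl
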